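-- pv_equiv track=rewrite | github.com/sguberman/advent-of-code-2015 | day25.py | code_number
-- ===== SOURCE A (Python) =====
-- def code_number(row, col):
--     n = sum(range(1, row)) + 1
--     r = row
--     c = 1
--     nextrow = r + 1
--     while not (r == row and c == col):
--         r -= 1
--         c += 1
--         n += 1
--         if r == 0:
--             r = nextrow
--             nextrow += 1
--             c = 1
--     return n
-- ===== SOURCE B (Python) =====
-- def code_number(row, col):
--     d = row + col - 2
--     return d * (d + 1) // 2 + col
-- ===== Notes on version B (the rewrite author's own statement) =====
-- stated objective: faster
-- what changed: Replaced the cell-by-cell diagonal walk (plus the sum(range(...)) seed) with the closed-form triangular-number formula (row+col-2)(row+col-1)//2 + col.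
-- outside the precondition, e.g. on code_number(-3, 1): A returns 1, B returns 7; on code_number(2, 0): A does not finish within the time limit, B returns 0
import Mathlib
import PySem

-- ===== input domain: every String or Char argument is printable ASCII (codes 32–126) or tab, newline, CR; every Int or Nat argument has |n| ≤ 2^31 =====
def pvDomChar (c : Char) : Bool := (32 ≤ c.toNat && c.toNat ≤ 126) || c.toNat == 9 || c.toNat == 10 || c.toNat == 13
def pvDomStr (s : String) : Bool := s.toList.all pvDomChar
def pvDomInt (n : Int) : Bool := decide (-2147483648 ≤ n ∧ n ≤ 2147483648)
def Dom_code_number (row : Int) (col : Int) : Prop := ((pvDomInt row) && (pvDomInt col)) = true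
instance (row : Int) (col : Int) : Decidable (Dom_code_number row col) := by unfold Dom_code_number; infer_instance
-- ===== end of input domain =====

-- B replaces A's cell-by-cell diagonal walk with the closed-form triangular-number formula (O(1) vs O((row+col)^2)).


-- ===== PORT A =====
-- the while loop, step for step; the Nat fuel only makes the recursion total
-- (under Pre_ the proof shows it is never exhausted)
def code_number_loop (row col : Int) : Nat → Int → Int → Int → Int → Int
  | 0, n, _, _, _ => n
  | fuel+1, n, r, c, nextrow =>
    if r = row ∧ c = col then n
    else
      let r' := r - 1
      let c' := c + 1
      let n' := n + 1
      if r' = 0 then code_number_loop row col fuel n' nextrow 1 (nextrow + 1)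
      else code_number_loop row col fuel n' r' c' nextrow

def code_number (row : Int) (col : Int) : Int :=
  let n := (PySem.List.pyRange 1 row 1).foldl (· + ·) 0 + 1   -- sum(range(1, row)) + 1
  code_number_loop row col (((row + col) * (row + col)).toNat + 1) n row 1 (row + 1)

-- ===== PORT B =====
def code_number_alt (row : Int) (col : Int) : Int :=
  let d := row + col - 2
  PySem.Int.floordiv (d * (d + 1)) 2 + col

-- ===== PRECONDITION & SPEC =====
-- Pre_ restricts to the natural 1-based grid coordinates: A loops forever when col < 1
-- (or when row < 1 and col > 1), and for row ≤ 0 with col = 1 its returned value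
-- sum(range(1,row)) + 1 = 1 is an accident of the empty-range seed, not a diagonal index.
def Pre_code_number (row : Int) (col : Int) : Prop := 1 ≤ row ∧ 1 ≤ col
instance (row : Int) (col : Int) : Decidable (Pre_code_number row col) := by unfold Pre_code_number; infer_instance
def pvWitness_code_number : Int × Int := (3, 4)
def Spec_code_number (row : Int) (col : Int) (out : Int) : Prop := out = code_number_alt row col
instance (row : Int) (col : Int) (out : Int) : Decidable (Spec_code_number row col out) := by unfold Spec_code_number; infer_instance

-- ===== CLAIM (what is proved, stated in full; the proofs are below) =====
def Claim_equal_code_number : Prop := ∀ (row : Int) (col : Int), Dom_code_number row col → Pre_code_number row col → Spec_code_number row col (code_number row col)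

-- ===== LEMMAS AND PROOFS =====

-- 2 * sum(range(1, row)) = row * (row - 1)  for 1 ≤ row
theorem pv_sum_range (m : Nat) :
    2 * ((PySem.List.pyRange 1 (1 + (m : Int)) 1).foldl (· + ·) 0) = (m : Int) * ((m : Int) + 1) := by
  induction m with
  | zero => decide
  | succ k ih =>
    have hcast : (1 : Int) + ((k + 1 : Nat) : Int) = (1 + (k : Int)) + 1 := by push_cast; ring
    rw [hcast, PySem.List.pyRange_one_succ_right (a := 1) (b := 1 + (k : Int)) (by omega),
      List.foldl_append]
    simp only [List.foldl_cons, List.foldl_nil]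
    push_cast
    push_cast at ih
    ring_nf
    ring_nf at ih
    omega

-- uniqueness of the diagonal decomposition n = T(d) + c, 1 ≤ c ≤ d + 1
theorem pv_diag_unique (d₁ c₁ d₂ c₂ : Int)
    (hd₁ : 0 ≤ d₁) (hc₁ : 1 ≤ c₁) (hc₁' : c₁ ≤ d₁ + 1)
    (hd₂ : 0 ≤ d₂) (hc₂ : 1 ≤ c₂) (hc₂' : c₂ ≤ d₂ + 1)
    (h : d₁ * (d₁ + 1) + 2 * c₁ = d₂ * (d₂ + 1) + 2 * c₂) :
    d₁ = d₂ ∧ c₁ = c₂ := by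
  have hdd : d₁ = d₂ := by
    rcases lt_trichotomy d₁ d₂ with hlt | heq | hgt
    · nlinarith
    · exact heq
    · nlinarith
  subst hdd
  constructor
  · rfl
  · omega

-- loop invariant: the loop returns the target value of the alternative closed form
theorem pv_loop (row col : Int) (hrow : 1 ≤ row) (hcol : 1 ≤ col) (N : Int)
    (hN : 2 * N = (row + col - 2) * (row + col - 1) + 2 * col) :
    ∀ (fuel : Nat) (n r c : Int), 1 ≤ r → 1 ≤ c →
    2 * n = (r + c - 2) * (r + c - 1) + 2 * c → n ≤ N → (N - n).toNat < fuel →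
    code_number_loop row col fuel n r c (r + c) = N := by
  intro fuel
  induction fuel with
  | zero => intro n r c _ _ _ hle hf; omega
  | succ k ih =>
    intro n r c hr hc hinv hle hf
    rw [code_number_loop]
    by_cases hstop : r = row ∧ c = col
    · rw [if_pos hstop]
      obtain ⟨h1, h2⟩ := hstop
      subst h1; subst h2
      omega
    · rw [if_neg hstop]
      have hlt : n < N := by
        rcases eq_or_lt_of_le hle with heq | hlt
        · exfalso
          subst heq
          have := pv_diag_unique (r + c - 2) c (row + col - 2) col
            (by omega) hc (by omega) (by omega) hcol (by omega) (by linear_combination hN - hinv)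
          exact hstop ⟨by omega, this.2⟩
        · exact hlt
      by_cases hz : r - 1 = 0
      · rw [if_pos hz]
        have hr1 : r = 1 := by omega
        have := ih (n + 1) (r + c) 1 (by omega) (by omega)
          (by subst hr1; linear_combination hinv) (by omega) (by omega)
        simpa using this
      · rw [if_neg hz]
        have := ih (n + 1) (r - 1) (c + 1) (by omega) (by omega)
          (by linear_combination hinv) (by omega) (by omega)
        have harg : r - 1 + (c + 1) = r + c := by ring
        rw [harg] at this
        exact this

-- ===== VERDICT (by name: the statement is the Claim_ definition above) =====
theorem code_number_spec : Claim_equal_code_number := by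
  intro row col _ hpre
  obtain ⟨hrow, hcol⟩ := hpre
  unfold Spec_code_number code_number code_number_alt
  set d : Int := row + col - 2 with hd
  -- the closed form N
  set N : Int := PySem.Int.floordiv (d * (d + 1)) 2 + col with hNdef
  have hdvd : 2 * PySem.Int.floordiv (d * (d + 1)) 2 = d * (d + 1) := by
    obtain ⟨m, hm⟩ := Int.even_mul_succ_self d
    rw [show d * (d + 1) = 2 * m by omega]
    have : PySem.Int.floordiv (2 * m) 2 = m := by
      simp [PySem.Int.floordiv, Int.mul_fdiv_cancel_left m (by norm_num : (2:Int) ≠ 0)]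
    rw [this]
  have hN : 2 * N = d * (d + 1) + 2 * col := by rw [hNdef]; omega
  -- seed value
  have hseed : 2 * ((PySem.List.pyRange 1 row 1).foldl (· + ·) 0 + 1)
      = (row + 1 - 2) * (row + 1 - 1) + 2 * 1 := by
    obtain ⟨m, hm⟩ : ∃ m : Nat, row = 1 + (m : Int) := ⟨(row - 1).toNat, by omega⟩
    rw [hm]
    have := pv_sum_range m
    ring_nf
    ring_nf at this
    omega
  have hfuel : (N - ((PySem.List.pyRange 1 row 1).foldl (· + ·) 0 + 1)).toNat
      < ((row + col) * (row + col)).toNat + 1 := by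
    have h1 : N ≤ (row + col) * (row + col) := by nlinarith
    have h2 : 1 ≤ (PySem.List.pyRange 1 row 1).foldl (· + ·) 0 + 1 := by nlinarith [hseed]
    omega
  have hle : (PySem.List.pyRange 1 row 1).foldl (· + ·) 0 + 1 ≤ N := by nlinarith [hseed]
  have := pv_loop row col hrow hcol N (by rw [hN, hd]; ring) (((row + col) * (row + col)).toNat + 1)
    ((PySem.List.pyRange 1 row 1).foldl (· + ·) 0 + 1) row 1 hrow (by norm_num)
    (by omega) hle hfuel
  simpa using this
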